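-- pv_equiv track=rewrite | github.com/AdamZhouSE/pythonHomework | Code/CodeRecords/2678/60727/278479.py | so
-- ===== SOURCE A (Python) =====
-- def so(li):
--     index = -1
--     for i in range(0,len(li)):
--         if li[i] == '1' and index==-1:
--             index = i
--             continue
--         if li[i]=='1' and index!=-1:
--             return -1
--     if index ==0:
--         index = 2
--     return index;
-- ===== SOURCE B (Python) =====
-- def _uniq(li, lo, hi):
--     # divide and conquer on the index range [lo, hi): positions of '1',
--     # truncated to at most 2 (the right half is skipped once two are known)
--     if hi - lo == 0:
--         return []
--     if hi - lo == 1: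
--         return [lo] if li[lo] == '1' else []
--     mid = (lo + hi) // 2
--     left = _uniq(li, lo, mid)
--     if len(left) > 1:
--         return left
--     return (left + _uniq(li, mid, hi))[:2]
--
--
-- def so(li):
--     ones = _uniq(li, 0, len(li))
--     if len(ones) != 1:
--         return -1
--     return 2 if ones[0] == 0 else ones[0]
-- ===== Notes on version B (the rewrite author's own statement) =====
-- stated objective: alternative
-- what changed: Replaced A's stateful left-to-right early-exit scan with a divide-and-conquer binary split of the index range that collects at most two positions of '1' (pruning the right half once two are found), then decides from that position list.
import Mathlib
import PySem

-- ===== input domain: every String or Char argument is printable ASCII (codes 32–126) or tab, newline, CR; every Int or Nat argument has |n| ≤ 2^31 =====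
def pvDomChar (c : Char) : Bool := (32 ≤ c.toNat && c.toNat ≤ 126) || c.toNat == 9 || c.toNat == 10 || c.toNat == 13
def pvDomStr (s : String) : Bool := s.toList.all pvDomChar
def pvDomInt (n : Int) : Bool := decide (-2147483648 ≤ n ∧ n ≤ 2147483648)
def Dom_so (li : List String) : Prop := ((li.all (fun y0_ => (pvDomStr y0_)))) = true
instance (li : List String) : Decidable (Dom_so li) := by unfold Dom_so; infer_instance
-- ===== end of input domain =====

-- B replaces A's stateful left-to-right early-exit scan with a divide-and-conquer
-- binary split collecting at most two positions of '1'; same result, different algorithm.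

-- ===== PORT A =====
-- A's loop with early return: recursion over the list carrying the absolute
-- position i and the mutable 'index'; the post-loop 'if index==0: index=2' is the base case.
def soLoop : List String → Int → Int → Int
  | [], _, index => if index == 0 then 2 else index
  | x :: xs, i, index =>
    if x == "1" && index == -1 then soLoop xs (i + 1) i
    else if x == "1" && index != -1 then -1
    else soLoop xs (i + 1) index

def so (li : List String) : Int := soLoop li 0 (-1)

-- ===== PORT B =====
-- termination of _uniq: both halves of [lo, hi) are strictly shorter (cited by decreasing_by)
theorem uniq_dec1 (lo hi : Nat) (h0 : ¬(hi - lo = 0)) (h1 : ¬(hi - lo = 1)) :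
    (lo + hi) / 2 - lo < hi - lo := by omega
theorem uniq_dec2 (lo hi : Nat) (h0 : ¬(hi - lo = 0)) (h1 : ¬(hi - lo = 1)) :
    hi - (lo + hi) / 2 < hi - lo := by omega

-- _uniq: divide and conquer on the index range [lo, hi); li[lo] is always in
-- range when called from so_alt (hi ≤ li.length), where getD is exact.
def uniq (li : List String) (lo hi : Nat) : List Nat :=
  if hi - lo = 0 then []
  else if hi - lo = 1 then (if li.getD lo "" == "1" then [lo] else [])
  else
    let mid := (lo + hi) / 2
    let left := uniq li lo mid
    if left.length > 1 then left
    else (left ++ uniq li mid hi).take 2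
termination_by hi - lo
decreasing_by
  · exact uniq_dec1 lo hi (by assumption) (by assumption)
  · exact uniq_dec2 lo hi (by assumption) (by assumption)

def so_alt (li : List String) : Int :=
  let ones := uniq li 0 li.length
  if ones.length ≠ 1 then -1
  else if ones.getD 0 0 = 0 then 2 else (ones.getD 0 0 : Int)

-- ===== PRECONDITION & SPEC =====
def Spec_so (li : List String) (out : Int) : Prop := out = so_alt li
instance (li : List String) (out : Int) : Decidable (Spec_so li out) := by unfold Spec_so; infer_instance

-- ===== CLAIM (what is proved, stated in full; the proofs are below) =====
def Claim_equal_so : Prop := ∀ (li : List String), Dom_so li → Spec_so li (so li)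

-- ===== LEMMAS AND PROOFS =====

-- positions of '1' in a list (the specification both ports are reduced to)
def posList : List String → List Nat
  | [] => []
  | x :: xs => (if x == "1" then [0] else []) ++ (posList xs).map (· + 1)

theorem posList_append (a b : List String) :
    posList (a ++ b) = posList a ++ (posList b).map (· + a.length) := by
  induction a with
  | nil => simp [posList]
  | cons x xs ih =>
    simp [posList, ih, List.map_map, List.append_assoc]

theorem posList_length (li : List String) : (posList li).length = li.count "1" := by
  induction li with
  | nil => simp [posList]
  | cons x xs ih => by_cases h : x = "1" <;> simp [posList, h, ih]

theorem posList_head (li : List String) :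
    PySem.List.index? li "1" = (posList li).head? := by
  induction li with
  | nil => simp [posList, PySem.List.index?]
  | cons x xs ih =>
    by_cases h : x = "1"
    · subst h; rw [PySem.List.index?_cons_self]; simp [posList]
    · rw [PySem.List.index?_cons_of_ne _ (by simpa using h), ih]
      simp [posList, h]

-- the divide-and-conquer helper computes the first ≤2 positions of '1' in li[lo:hi]
theorem uniq_spec_aux (li : List String) (n : Nat) : ∀ lo hi, hi - lo ≤ n → lo ≤ hi → hi ≤ li.length →
    uniq li lo hi = ((posList ((li.drop lo).take (hi - lo))).map (· + lo)).take 2 := by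
  induction n with
  | zero =>
    intro lo hi hn _ _
    have h0 : hi - lo = 0 := by omega
    rw [uniq.eq_def]
    simp [h0, posList]
  | succ n ih =>
    intro lo hi hn hlo hhi
    rw [uniq.eq_def]
    by_cases h0 : hi - lo = 0
    · simp [h0, posList]
    by_cases h1 : hi - lo = 1
    · have hlt : lo < li.length := by omega
      have hdrop : li.drop lo = li[lo] :: li.drop (lo + 1) := List.drop_eq_getElem_cons hlt
      simp only [h1, if_true]
      rw [hdrop]
      simp only [List.take_succ_cons, List.take_zero]
      rw [List.getD_eq_getElem li "" hlt]
      by_cases hx : li[lo] == "1" <;> simp [posList, hx]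
    · simp only [h0, h1, if_false]
      have hm1 : lo ≤ (lo + hi) / 2 := by omega
      have hm2 : (lo + hi) / 2 ≤ hi := by omega
      have hmlo : (lo + hi) / 2 - lo ≤ n := by omega
      have hmhi : hi - (lo + hi) / 2 ≤ n := by omega
      have hmid : (lo + hi) / 2 ≤ li.length := by omega
      have hml : 2 ≤ hi - lo := by omega
      generalize (lo + hi) / 2 = mid at hm1 hm2 hmlo hmhi hmid ⊢
      have hsplit : (li.drop lo).take (hi - lo)
          = (li.drop lo).take (mid - lo) ++ (li.drop mid).take (hi - mid) := by
        have h2 : hi - lo = (mid - lo) + (hi - mid) := by omega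
        have h3 : lo + (mid - lo) = mid := by omega
        rw [h2, List.take_add, List.drop_drop, h3]
      have hlen : ((li.drop lo).take (mid - lo)).length = mid - lo := by
        simp
        omega
      rw [hsplit, posList_append, hlen, List.map_append, List.map_map]
      set L := (posList ((li.drop lo).take (mid - lo))).map (· + lo) with hL
      have hR : (posList ((li.drop mid).take (hi - mid))).map ((· + lo) ∘ (· + (mid - lo)))
          = (posList ((li.drop mid).take (hi - mid))).map (· + mid) := by
        apply List.map_congr_left
        intro a _
        simp
        omega
      rw [hR]
      set R := (posList ((li.drop mid).take (hi - mid))).map (· + mid) with hRdef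
      have hleft : uniq li lo mid = L.take 2 := ih lo mid hmlo hm1 hmid
      rw [hleft, ih mid hi hmhi hm2 hhi, ← hRdef]
      by_cases hlong : (L.take 2).length > 1
      · -- L already has ≥ 2 elements: the right half is pruned
        have hL2 : 2 ≤ L.length := by
          simp at hlong
          omega
        simp only [hlong, if_true]
        rw [List.take_append]
        have h2 : 2 - L.length = 0 := by omega
        simp [h2]
      · have hL1 : L.length ≤ 1 := by
          simp at hlong
          omega
        have hLfull : L.take 2 = L := List.take_of_length_le (by omega)
        rw [if_neg hlong, hLfull]
        rw [List.take_append, List.take_append]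
        congr 1
        rw [List.take_take]
        congr 1
        omega

theorem uniq_spec (li : List String) (lo hi : Nat) (hlo : lo ≤ hi) (hhi : hi ≤ li.length) :
    uniq li lo hi = ((posList ((li.drop lo).take (hi - lo))).map (· + lo)).take 2 :=
  uniq_spec_aux li (hi - lo) lo hi le_rfl hlo hhi

theorem soLoop_found (xs : List String) (i j : Int) (hj : j ≠ -1) :
    soLoop xs i j = if xs.count "1" = 0 then (if j == 0 then 2 else j) else -1 := by
  induction xs generalizing i with
  | nil => simp [soLoop]
  | cons x xs ih =>
    by_cases hx : x = "1"
    · subst hx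
      simp [soLoop, hj]
    · simp [soLoop, hx, ih _]

theorem soLoop_main (xs : List String) (i : Int) (hi : 0 ≤ i) :
    soLoop xs i (-1) =
      if xs.count "1" = 1 then
        match PySem.List.index? xs "1" with
        | some idx => if i + idx == 0 then 2 else i + idx
        | none => -1
      else -1 := by
  induction xs generalizing i with
  | nil => simp [soLoop]
  | cons x xs ih =>
    by_cases hx : x = "1"
    · subst hx
      rw [PySem.List.index?_cons_self]
      have hfound := soLoop_found xs (i + 1) i (by omega)
      by_cases h0 : xs.count "1" = 0
      · simp [soLoop, hfound, h0]
      · simp only [soLoop, hfound, h0]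
        simp
        omega
    · rw [PySem.List.index?_cons_of_ne xs hx]
      simp only [soLoop]
      rw [ih (i + 1) (by omega)]
      simp only [List.count_cons]
      cases h : PySem.List.index? xs "1" with
      | none => simp [hx]
      | some idx =>
        simp only [Option.map_some]
        have : i + ((idx : Int) + 1) = (i + 1) + idx := by ring
        simp [hx, this]

-- ===== VERDICT (by name: the statement is the Claim_ definition above) =====
theorem so_spec : Claim_equal_so := by
  intro li _
  unfold Spec_so so so_alt
  rw [soLoop_main li 0 le_rfl]
  rw [uniq_spec li 0 li.length (Nat.zero_le _) le_rfl]
  simp only [List.drop_zero, Nat.sub_zero, List.take_length]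
  have hlen := posList_length li
  have hhead := posList_head li
  match hps : posList li with
  | [] =>
    rw [hps] at hlen
    simp [← hlen]
  | [a] =>
    rw [hps] at hlen hhead
    simp only [List.head?_cons] at hhead
    rw [← hlen, hhead]
    simp only [List.map_cons, List.map_nil]
    by_cases ha : a = 0 <;> simp [ha]
  | a :: b :: t =>
    rw [hps] at hlen
    have : li.count "1" ≠ 1 := by rw [← hlen]; simp
    simp [this]
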